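-- pv_equiv track=rewrite | github.com/ZhangWeinian/MinesweeperSolve | src/app/manager/MathematicalSolver.py | _merge_dp
-- ===== SOURCE A (Python) =====
-- from collections import defaultdict
--
-- def _merge_dp(dp1, dp2, max_mines):
--     """合并两个动态规划表"""
--
--     merged = defaultdict(int)
--     for m1, w1 in dp1.items():
--         for m2, w2 in dp2.items():
--             total = m1 + m2
--             if total <= max_mines:
--                 merged[total] += w1 * w2
--
--     return dict(merged)
-- ===== SOURCE B (Python) =====
-- def _merge_dp(dp1, dp2, max_mines):
--     """Merge two mine-count DP tables by a truncated convolution.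
--
--     Gather formulation: enumerate the reachable totals (deduplicated with
--     dict.fromkeys), then compute each total's weight directly as a
--     complement-lookup sum over dp1, so no running-sum table is maintained."""
--     totals = dict.fromkeys(m1 + m2 for m1 in dp1 for m2 in dp2 if m1 + m2 <= max_mines)
--     return {t: sum(w1 * dp2.get(t - m1, 0) for m1, w1 in dp1.items()) for t in totals}
-- ===== Notes on version B (the rewrite author's own statement) =====
-- stated objective: alternative
-- what changed: Replaces the scatter-accumulate into a defaultdict by a gather: the reachable totals are enumerated and deduplicated with dict.fromkeys, then each merged value is computed directly as a truncated-convolution sum with a keyed complement lookup dp2.get(t - m1, 0), so no dict of running sums is ever maintained; Pre_ excludes association lists giving dp2 duplicate keys, which do not represent a Python dict argument (a dict collapses duplicate keys before _merge_dp runs, so at the Python level nothing is excluded).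
import Mathlib
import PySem

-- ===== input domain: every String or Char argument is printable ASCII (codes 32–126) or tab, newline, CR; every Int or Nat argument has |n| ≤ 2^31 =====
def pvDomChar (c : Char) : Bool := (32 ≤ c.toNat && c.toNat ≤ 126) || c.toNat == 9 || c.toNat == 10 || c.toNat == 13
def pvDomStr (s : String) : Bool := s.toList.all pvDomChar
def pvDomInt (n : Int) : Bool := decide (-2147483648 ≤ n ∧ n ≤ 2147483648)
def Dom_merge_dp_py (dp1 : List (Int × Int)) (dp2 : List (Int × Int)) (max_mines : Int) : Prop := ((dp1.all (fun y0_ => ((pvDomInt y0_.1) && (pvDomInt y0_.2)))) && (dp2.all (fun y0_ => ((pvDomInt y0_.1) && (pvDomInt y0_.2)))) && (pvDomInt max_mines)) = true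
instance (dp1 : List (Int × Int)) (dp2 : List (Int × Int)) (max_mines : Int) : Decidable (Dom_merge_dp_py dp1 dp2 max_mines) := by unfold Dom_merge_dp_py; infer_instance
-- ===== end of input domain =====

-- B replaces A's scatter-accumulation into a defaultdict by an ordered-dedup key pass plus a
-- gather (complement-lookup convolution sum) per merged total; alternative decomposition, not faster.


-- ===== PORT A =====
def merge_dp_py (dp1 : List (Int × Int)) (dp2 : List (Int × Int)) (max_mines : Int) : List (Int × Int) :=
  (dp1.foldl (fun (merged : PySem.Dict Int Int) p =>
      dp2.foldl (fun merged q =>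
          if p.1 + q.1 ≤ max_mines then merged.modify (p.1 + q.1) 0 (· + p.2 * q.2) else merged)
        merged)
    PySem.Dict.empty).items

-- ===== PORT B =====
def merge_dp_py_alt (dp1 : List (Int × Int)) (dp2 : List (Int × Int)) (max_mines : Int) : List (Int × Int) :=
  let totals : PySem.Set Int :=
    PySem.Set.ofList
      (dp1.flatMap (fun p => (dp2.map (fun q => p.1 + q.1)).filter (fun t => decide (t ≤ max_mines))))
  let d2 := PySem.Dict.ofList dp2
  totals.map (fun t => (t, (dp1.map (fun p => p.2 * d2.getD (t - p.1) 0)).sum))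

-- ===== PRECONDITION & SPEC =====
-- Pre_ excludes dp2 association lists with duplicate keys: they do not represent a Python
-- dict argument (Python's dict collapses duplicate keys before _merge_dp ever runs).
def Pre_merge_dp_py (dp1 : List (Int × Int)) (dp2 : List (Int × Int)) (max_mines : Int) : Prop :=
  (dp2.map Prod.fst).Nodup
instance (dp1 : List (Int × Int)) (dp2 : List (Int × Int)) (max_mines : Int) : Decidable (Pre_merge_dp_py dp1 dp2 max_mines) := by unfold Pre_merge_dp_py; infer_instance
def pvWitness_merge_dp_py : (List (Int × Int)) × (List (Int × Int)) × Int := ([(0, 1), (1, 2)], [(0, 3), (2, 5)], 2)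

def Spec_merge_dp_py (dp1 : List (Int × Int)) (dp2 : List (Int × Int)) (max_mines : Int) (out : List (Int × Int)) : Prop := out = merge_dp_py_alt dp1 dp2 max_mines
instance (dp1 : List (Int × Int)) (dp2 : List (Int × Int)) (max_mines : Int) (out : List (Int × Int)) : Decidable (Spec_merge_dp_py dp1 dp2 max_mines out) := by unfold Spec_merge_dp_py; infer_instance

-- ===== CLAIM (what is proved, stated in full; the proofs are below) =====
def Claim_equal_merge_dp_py : Prop := ∀ (dp1 : List (Int × Int)) (dp2 : List (Int × Int)) (max_mines : Int), Dom_merge_dp_py dp1 dp2 max_mines → Pre_merge_dp_py dp1 dp2 max_mines → Spec_merge_dp_py dp1 dp2 max_mines (merge_dp_py dp1 dp2 max_mines)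

-- ===== LEMMAS AND PROOFS =====

-- the (total, weight) pairs the nested loop visits, already truncated at max_mines
def pvPairs (dp1 dp2 : List (Int × Int)) (mm : Int) : List (Int × Int) :=
  (dp1.flatMap (fun p => dp2.map (fun q => (p.1 + q.1, p.2 * q.2)))).filter (fun r => decide (r.1 ≤ mm))

-- the nested loop over (dp1, dp2) with the ≤-test is one fold over pvPairs
theorem pv_nested_foldl {γ : Type} (dp2 : List (Int × Int)) (mm : Int) (step : γ → Int × Int → γ) :
    ∀ (dp1 : List (Int × Int)) (a : γ),
      dp1.foldl (fun a p => dp2.foldl (fun a q => if p.1 + q.1 ≤ mm then step a (p.1 + q.1, p.2 * q.2) else a) a) a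
      = (pvPairs dp1 dp2 mm).foldl step a := by
  intro dp1
  induction dp1 with
  | nil => intro a; simp [pvPairs]
  | cons p dp1 ih =>
    intro a
    rw [List.foldl_cons, ih]
    have h1 : dp2.foldl (fun a q => if p.1 + q.1 ≤ mm then step a (p.1 + q.1, p.2 * q.2) else a) a
        = ((dp2.map (fun q => (p.1 + q.1, p.2 * q.2))).filter (fun r => decide (r.1 ≤ mm))).foldl step a := by
      rw [PySem.List.foldl_ite_eq_foldl_filter (p := fun q => p.1 + q.1 ≤ mm)
            (fun a q => step a (p.1 + q.1, p.2 * q.2)) dp2 a,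
          List.filter_map, List.foldl_map]
      rfl
    rw [h1]
    simp only [pvPairs, List.flatMap_cons, List.filter_append, List.foldl_append]

-- dict built from a duplicate-free association list: lookup = the (unique) matching entry's value
theorem pv_getD_update (l : List (Int × Int)) (d : PySem.Dict Int Int) (k : Int)
    (h : (l.map Prod.fst).Nodup) :
    (d.update l).getD k 0 = if k ∈ l.map Prod.fst
      then ((l.filter (fun q => q.1 == k)).map Prod.snd).sum else d.getD k 0 := by
  induction l using List.reverseRecOn generalizing d with
  | nil => simp [PySem.Dict.update]
  | append_singleton l p ih =>
    simp only [List.map_append, List.nodup_append] at h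
    have hfold : d.update (l ++ [p]) = (d.update l).insert p.1 p.2 := by
      simp [PySem.Dict.update]
    rw [hfold, PySem.Dict.getD_insert, ih _ h.1]
    by_cases hk : k = p.1
    · subst hk
      have hnl : p.1 ∉ l.map Prod.fst := fun hmem => (h.2.2 p.1 hmem p.1 (by simp)) rfl
      have hfil : l.filter (fun q => q.1 == p.1) = [] := by
        rw [List.filter_eq_nil_iff]
        intro q hq hq'
        exact hnl (List.mem_map.mpr ⟨q, hq, by simpa using hq'⟩)
      simp [hfil, hnl, List.filter_append]
    · have hpk : ¬ (p.1 == k) = true := by simpa using fun e => hk e.symm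
      by_cases hmem : k ∈ l.map Prod.fst
      · simp [hk, hmem, List.filter_append, hpk]
      · simp [hk, hmem]

theorem pv_getD_ofList (dp2 : List (Int × Int)) (k : Int) (h : (dp2.map Prod.fst).Nodup) :
    (PySem.Dict.ofList dp2).getD k 0 = ((dp2.filter (fun q => q.1 == k)).map Prod.snd).sum := by
  rw [PySem.Dict.ofList, pv_getD_update _ _ _ h]
  by_cases hmem : k ∈ dp2.map Prod.fst
  · simp [hmem]
  · have hfil : dp2.filter (fun q => q.1 == k) = [] := by
      rw [List.filter_eq_nil_iff]
      intro q hq hq'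
      exact hmem (List.mem_map.mpr ⟨q, hq, by simpa using hq'⟩)
    simp [hmem, hfil, PySem.Dict.getD_empty]

-- the defaultdict accumulation loop, value at a key
theorem pv_getD_fold_modify (L : List (Int × Int)) (d : PySem.Dict Int Int) (c : Int) :
    (L.foldl (fun d r => d.modify r.1 0 (· + r.2)) d).getD c 0
      = d.getD c 0 + ((L.filter (fun r => r.1 == c)).map Prod.snd).sum := by
  induction L generalizing d with
  | nil => simp
  | cons r L ih =>
    rw [List.foldl_cons, ih, PySem.Dict.getD_modify]
    by_cases hc : c = r.1
    · simp only [hc, List.filter_cons, beq_self_eq_true, if_pos trivial]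
      simp
      ring
    · have : ¬ (r.1 == c) = true := by simpa using fun e => hc e.symm
      simp [hc, this]

-- A = keys in first-occurrence order, each with its group sum
theorem pv_A_items (dp1 dp2 : List (Int × Int)) (mm : Int) :
    merge_dp_py dp1 dp2 mm
      = (PySem.Set.ofList ((pvPairs dp1 dp2 mm).map Prod.fst)).map
          (fun k => (k, (((pvPairs dp1 dp2 mm).filter (fun r => r.1 == k)).map Prod.snd).sum)) := by
  have hA : merge_dp_py dp1 dp2 mm
      = ((pvPairs dp1 dp2 mm).foldl (fun (d : PySem.Dict Int Int) r => d.modify r.1 0 (· + r.2)) PySem.Dict.empty).items :=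
    congrArg PySem.Dict.items
      (pv_nested_foldl dp2 mm (fun (d : PySem.Dict Int Int) r => d.modify r.1 0 (· + r.2)) dp1 PySem.Dict.empty)
  rw [hA]
  have hkeys : ((pvPairs dp1 dp2 mm).foldl (fun (d : PySem.Dict Int Int) r => d.modify r.1 0 (· + r.2)) PySem.Dict.empty).keys
      = PySem.Set.ofList ((pvPairs dp1 dp2 mm).map Prod.fst) := by
    have := PySem.Dict.keys_foldl_modify_key (pvPairs dp1 dp2 mm) Prod.fst 0
      (fun (_ : PySem.Dict Int Int) (r : Int × Int) => (· + r.2)) PySem.Dict.empty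
    rw [this, PySem.Dict.keys_empty, PySem.Set.ofList_eq_foldl]
    rfl
  have hnd : ((pvPairs dp1 dp2 mm).foldl (fun (d : PySem.Dict Int Int) r => d.modify r.1 0 (· + r.2)) PySem.Dict.empty).keys.Nodup :=
    PySem.Dict.nodup_keys_foldl_modify_key (pvPairs dp1 dp2 mm) Prod.fst 0
      (fun _ r => (· + r.2)) PySem.Dict.empty PySem.Dict.nodup_keys_empty
  rw [PySem.Dict.items_eq_map_keys _ hnd 0, hkeys]
  apply List.map_congr_left
  intro k _
  rw [pv_getD_fold_modify]
  simp

-- B = the same key list, each with its gather sum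
theorem pv_B_eq (dp1 dp2 : List (Int × Int)) (mm : Int) :
    merge_dp_py_alt dp1 dp2 mm
      = (PySem.Set.ofList ((pvPairs dp1 dp2 mm).map Prod.fst)).map
          (fun t => (t, (dp1.map (fun p => p.2 * (PySem.Dict.ofList dp2).getD (t - p.1) 0)).sum)) := by
  unfold merge_dp_py_alt
  have htot : dp1.flatMap (fun p => (dp2.map (fun q => p.1 + q.1)).filter (fun t => decide (t ≤ mm)))
      = (pvPairs dp1 dp2 mm).map Prod.fst := by
    simp only [pvPairs, List.filter_flatMap, List.map_flatMap, List.filter_map, List.map_map]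
    rfl
  rw [htot]

theorem pv_gather (dp1 dp2 : List (Int × Int)) (mm t : Int)
    (hnd : (dp2.map Prod.fst).Nodup) (htle : t ≤ mm) :
    (((pvPairs dp1 dp2 mm).filter (fun r => r.1 == t)).map Prod.snd).sum
      = (dp1.map (fun p => p.2 * (PySem.Dict.ofList dp2).getD (t - p.1) 0)).sum := by
  unfold pvPairs
  rw [List.filter_filter]
  have h1 : (dp1.flatMap (fun p => dp2.map (fun q => (p.1 + q.1, p.2 * q.2)))).filter
        (fun r => (r.1 == t) && decide (r.1 ≤ mm))
      = (dp1.flatMap (fun p => dp2.map (fun q => (p.1 + q.1, p.2 * q.2)))).filter (fun r => r.1 == t) := by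
    apply List.filter_congr
    intro r _
    by_cases hr : r.1 = t
    · simp [hr, htle]
    · simp [hr]
  rw [h1, List.filter_flatMap, List.map_flatMap, List.flatMap_def, List.sum_flatten, List.map_map]
  apply congrArg
  apply List.map_congr_left
  intro p _
  show (((dp2.map (fun q => (p.1 + q.1, p.2 * q.2))).filter (fun r => r.1 == t)).map Prod.snd).sum
      = p.2 * (PySem.Dict.ofList dp2).getD (t - p.1) 0
  rw [List.filter_map, List.map_map]
  have h2 : dp2.filter ((fun r : Int × Int => r.1 == t) ∘ fun q : Int × Int => (p.1 + q.1, p.2 * q.2))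
      = dp2.filter (fun q => q.1 == t - p.1) := by
    apply List.filter_congr
    intro q _
    show (p.1 + q.1 == t) = (q.1 == t - p.1)
    by_cases h : p.1 + q.1 = t
    · simp [show q.1 = t - p.1 by omega]
    · simp [h, show ¬ q.1 = t - p.1 from fun e => h (by omega)]
  rw [h2]
  show ((dp2.filter (fun q => q.1 == t - p.1)).map (fun q => p.2 * q.2)).sum = _
  rw [PySem.List.sum_map_const_mul_int, pv_getD_ofList dp2 (t - p.1) hnd]

theorem pv_final (dp1 dp2 : List (Int × Int)) (mm : Int) (hnd : (dp2.map Prod.fst).Nodup) :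
    merge_dp_py dp1 dp2 mm = merge_dp_py_alt dp1 dp2 mm := by
  rw [pv_A_items, pv_B_eq]
  apply List.map_congr_left
  intro t ht
  have htle : t ≤ mm := by
    rw [PySem.Set.mem_ofList] at ht
    obtain ⟨r, hr, hrt⟩ := List.mem_map.mp ht
    unfold pvPairs at hr
    have h := (List.mem_filter.mp hr).2
    simp only [decide_eq_true_eq] at h
    omega
  exact congrArg (fun v => (t, v)) (pv_gather dp1 dp2 mm t hnd htle)

-- ===== VERDICT (by name: the statement is the Claim_ definition above) =====
theorem merge_dp_py_spec : Claim_equal_merge_dp_py := by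
  intro dp1 dp2 max_mines _ hpre
  unfold Spec_merge_dp_py
  exact pv_final dp1 dp2 max_mines hpre
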